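-- pv_equiv track=rewrite | github.com/miliar/Code_Jam_Webscraper | solutions_python/Problem_155/2409.py | find
-- ===== SOURCE A (Python) =====
-- def find(array):
--     current_aud = array[0]
--     friends = 0
--     index = 1
--     for ele in array[1:]:
--         if ele == 0:
--             index += 1
--             continue
--         if current_aud < index:
--             friends += (index - current_aud)
--             current_aud += (index - current_aud + ele)
--             index += 1
--         else:
--             index += 1
--             current_aud += ele
--     return friends
-- ===== SOURCE B (Python) =====
-- def find(array):
--     cur = array[0]          # pure prefix sum of the audience sizes seen so far
--     best = 0                # running maximum shortfall
--     for i, ele in enumerate(array[1:], 1):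
--         if ele != 0:
--             best = max(best, i - cur)
--         cur += ele
--     return best
-- ===== Notes on version B (the rewrite author's own statement) =====
-- stated objective: simpler
-- what changed: Replaces A's combined audience-plus-injected-friends accumulator and its branching injection step with a pure prefix sum and a single running maximum of the per-position shortfall i - prefix.
import Mathlib
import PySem

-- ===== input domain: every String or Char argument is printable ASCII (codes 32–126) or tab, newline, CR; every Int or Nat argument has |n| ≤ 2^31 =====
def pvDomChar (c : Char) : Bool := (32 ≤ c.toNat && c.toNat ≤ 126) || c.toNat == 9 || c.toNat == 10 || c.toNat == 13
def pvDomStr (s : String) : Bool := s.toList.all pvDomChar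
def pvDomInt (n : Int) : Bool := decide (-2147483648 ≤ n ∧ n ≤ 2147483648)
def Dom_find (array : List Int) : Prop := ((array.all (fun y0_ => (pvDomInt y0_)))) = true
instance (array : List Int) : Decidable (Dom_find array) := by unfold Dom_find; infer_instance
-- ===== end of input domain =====

-- B replaces A's combined audience+friends accumulator with a pure prefix sum and a running max of the shortfall (objective: simpler).
-- ===== PORT A =====
def findLoop : List Int → Int × Int × Int → Int × Int × Int
  | [], s => s
  | ele :: rest, (current_aud, friends, index) =>
    if ele = 0 then
      findLoop rest (current_aud, friends, index + 1)
    else if current_aud < index then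
      findLoop rest (current_aud + (index - current_aud + ele), friends + (index - current_aud), index + 1)
    else
      findLoop rest (current_aud + ele, friends, index + 1)

def find (array : List Int) : Int :=
  match array with
  | [] => 0          -- Python raises IndexError here; excluded by Pre_find
  | a0 :: rest => (findLoop rest (a0, 0, 1)).2.1

-- ===== PORT B =====
def findAltLoop : List Int → Int × Int × Int → Int × Int × Int
  | [], s => s
  | ele :: rest, (cur, best, i) =>
    findAltLoop rest (cur + ele, (if ele ≠ 0 then max best (i - cur) else best), i + 1)

def find_alt (array : List Int) : Int :=
  match array with
  | [] => 0          -- Source B raises IndexError here; excluded by Pre_find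
  | a0 :: rest => (findAltLoop rest (a0, 0, 1)).2.1

-- ===== PRECONDITION & SPEC =====
-- Pre_find excludes only the empty list, on which both Pythons raise IndexError.
def Pre_find (array : List Int) : Prop := array ≠ []
instance (array : List Int) : Decidable (Pre_find array) := by unfold Pre_find; infer_instance
def pvWitness_find : List Int := [1, 0, 1, 2, 0]
def Spec_find (array : List Int) (out : Int) : Prop := out = find_alt array
instance (array : List Int) (out : Int) : Decidable (Spec_find array out) := by unfold Spec_find; infer_instance

-- ===== CLAIM (what is proved, stated in full; the proofs are below) =====
def Claim_equal_find : Prop := ∀ (array : List Int), Dom_find array → Pre_find array → Spec_find array (find array)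

-- ===== LEMMAS AND PROOFS =====
-- Invariant: A's state is B's state with the injected friends folded in:
-- current_aud = cur + best and friends = best.
theorem loop_rel (rest : List Int) : ∀ (cur best i : Int),
    findLoop rest (cur + best, best, i) =
      ((findAltLoop rest (cur, best, i)).1 + (findAltLoop rest (cur, best, i)).2.1,
       (findAltLoop rest (cur, best, i)).2.1,
       (findAltLoop rest (cur, best, i)).2.2) := by
  induction rest with
  | nil => intro cur best i; simp [findLoop, findAltLoop]
  | cons ele rest ih =>
    intro cur best i
    by_cases h0 : ele = 0
    · subst h0
      simp only [findLoop, findAltLoop]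
      have : cur + (0:Int) = cur := by ring
      simpa [this] using ih cur best (i + 1)
    · by_cases hlt : cur + best < i
      · have hmax : max best (i - cur) = i - cur := by omega
        simp only [findLoop, findAltLoop, if_pos hlt, hmax, h0, ne_eq,
          not_false_iff, if_true]
        have h1 : cur + best + (i - (cur + best) + ele) = (cur + ele) + (i - cur) := by ring
        have h2 : best + (i - (cur + best)) = i - cur := by ring
        rw [h1, h2]
        exact ih (cur + ele) (i - cur) (i + 1)
      · have hmax : max best (i - cur) = best := by omega
        simp only [findLoop, findAltLoop, if_neg hlt, hmax, h0, ne_eq,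
          not_false_iff, if_true]
        have h1 : cur + best + ele = (cur + ele) + best := by ring
        rw [h1]
        exact ih (cur + ele) best (i + 1)

-- ===== VERDICT (by name: the statement is the Claim_ definition above) =====
theorem find_spec : Claim_equal_find := by
  intro array _ hpre
  unfold Spec_find find find_alt
  match array with
  | [] => exact absurd rfl hpre
  | a0 :: rest =>
    have := loop_rel rest a0 0 1
    simpa using congrArg (fun s => s.2.1) this
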